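-- pv_equiv track=rewrite | github.com/vroomvroom314/Python-code-MiniProjects | Python Problems -SA/Week 7/Lab7.py | containsPythagoreanTriple
-- ===== SOURCE A (Python) =====
-- def containsPythagoreanTriple(a):
--     squareds = []
--     for i in range (len(a)):
--         squareds.append(a[i]**2)
--     squareds.sort()
--     #adds the squares of all the values within list a and sorts them
--     #the appending takes O(n) and the sorting takes O(nlogn)
--
--     for i in range (len(squareds)):
--         j = 0
--         k = i
--         #iterators that will go simulataneously through squareds list
--         while (j <= i and k >= 0):
--             if (squareds[j] + squareds[k] == squareds[i]):
--                 return True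
--                 #finds a pythagorean triple and returns true
--             elif (squareds[j] + squareds[k] > squareds[i]):
--                 k-=1
--             #decrements k each time the sum of squares of j and k is too big
--             elif (squareds[j] + squareds[k] < squareds[i]):
--                 j +=1
--             #increments k each time the sum of squares of j and k is too small
--
--     return False
-- ===== SOURCE B (Python) =====
-- def containsPythagoreanTriple(a):
--     squares = [x ** 2 for x in a]
--     sset = set(squares)
--     for t in squares:
--         for s in squares:
--             if (t - s) in sset:
--                 return True
--     return False
-- ===== Notes on version B (the rewrite author's own statement) =====
-- stated objective: idiomatic
-- what changed: Replaces A's sort plus converging two-pointer scan per target with a plain double loop over the squares testing (t - s) against a hash set of squares; no sorting, no pointer bookkeeping.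
import Mathlib
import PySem

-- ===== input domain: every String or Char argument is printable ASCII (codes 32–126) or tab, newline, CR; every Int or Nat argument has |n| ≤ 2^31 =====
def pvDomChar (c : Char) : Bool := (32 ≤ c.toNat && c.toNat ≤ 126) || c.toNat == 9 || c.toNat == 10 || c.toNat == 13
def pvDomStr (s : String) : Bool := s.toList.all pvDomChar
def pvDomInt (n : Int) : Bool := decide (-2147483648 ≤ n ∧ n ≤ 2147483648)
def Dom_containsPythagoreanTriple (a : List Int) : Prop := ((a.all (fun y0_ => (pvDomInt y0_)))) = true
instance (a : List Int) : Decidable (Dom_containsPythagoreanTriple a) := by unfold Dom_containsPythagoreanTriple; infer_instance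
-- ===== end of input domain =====

-- B replaces A's sort + converging two-pointer scan with a double loop over the squares
-- testing (t - s) against a set of all squares (objective: idiomatic / alternative traversal).

-- ===== PORT A =====
-- the inner 'while (j <= i and k >= 0)' loop; squareds[j]/[k]/[i] are always in range
-- in Python, so getD with j.toNat (j, k stay ≥ 0 inside the guard) is exact there
def pyInner (L : List Int) (i : Nat) (j k : Int) : Bool :=
  if h : j ≤ (i : Int) ∧ 0 ≤ k then
    if L.getD j.toNat 0 + L.getD k.toNat 0 = L.getD i 0 then true
    else if L.getD j.toNat 0 + L.getD k.toNat 0 > L.getD i 0 then pyInner L i j (k - 1)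
    else pyInner L i (j + 1) k
  else false
termination_by ((i : Int) - j + k + 2).toNat
decreasing_by all_goals omega

def containsPythagoreanTriple (a : List Int) : Bool :=
  -- for i in range(len(a)): squareds.append(a[i]**2)   (i always in range, so getD is exact)
  let squareds0 := (List.range a.length).foldl (fun acc i => acc ++ [(a.getD i 0) ^ 2]) []
  let squareds := PySem.List.sorted squareds0 (fun x => x) false
  (List.range squareds.length).any (fun i => pyInner squareds i 0 (i : Int))

-- ===== PORT B =====
def containsPythagoreanTriple_alt (a : List Int) : Bool :=
  let squares := a.map (fun x => x ^ 2)
  let sset : PySem.Set Int := PySem.Set.ofList squares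
  squares.any (fun t => squares.any (fun s => PySem.Set.contains sset (t - s)))

-- ===== PRECONDITION & SPEC =====
def Spec_containsPythagoreanTriple (a : List Int) (out : Bool) : Prop := out = containsPythagoreanTriple_alt a
instance (a : List Int) (out : Bool) : Decidable (Spec_containsPythagoreanTriple a out) := by unfold Spec_containsPythagoreanTriple; infer_instance

-- ===== CLAIM (what is proved, stated in full; the proofs are below) =====
def Claim_equal_containsPythagoreanTriple : Prop := ∀ (a : List Int), Dom_containsPythagoreanTriple a → Spec_containsPythagoreanTriple a (containsPythagoreanTriple a)

-- ===== LEMMAS AND PROOFS =====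

theorem getD_mono (L : List Int) (hs : L.Pairwise (· ≤ ·)) {p q : Nat}
    (hpq : p ≤ q) (hq : q < L.length) : L.getD p 0 ≤ L.getD q 0 := by
  rcases eq_or_lt_of_le hpq with rfl | h
  · exact le_refl _
  · rw [List.getD_eq_getElem _ _ (lt_of_le_of_lt hpq hq), List.getD_eq_getElem _ _ hq]
    exact List.pairwise_iff_getElem.mp hs p q _ hq h

theorem pyInner_iff (L : List Int) (hs : L.Pairwise (· ≤ ·)) (i : Nat) (hi : i < L.length)
    (j k : Int) :
    0 ≤ j → k ≤ (i : Int) →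
    (pyInner L i j k = true ↔
      ∃ p q : Nat, j ≤ (p : Int) ∧ p ≤ i ∧ (q : Int) ≤ k ∧
        L.getD p 0 + L.getD q 0 = L.getD i 0) := by
  fun_induction pyInner L i j k
  case case1 j k h heq =>
    intro hj hk
    simp only [true_iff]
    exact ⟨j.toNat, k.toNat, by omega, by omega, by omega, heq⟩
  case case2 j k h hne hgt ih =>
    intro hj hk
    rw [ih hj (by omega)]
    constructor
    · rintro ⟨p, q, h1, h2, h3, h4⟩; exact ⟨p, q, h1, h2, by omega, h4⟩
    · rintro ⟨p, q, h1, h2, h3, h4⟩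
      refine ⟨p, q, h1, h2, ?_, h4⟩
      by_contra hq
      have hqk : q = k.toNat := by omega
      have hmp : L.getD j.toNat 0 ≤ L.getD p 0 :=
        getD_mono L hs (by omega) (lt_of_le_of_lt h2 hi)
      subst hqk
      omega
  case case3 j k h hne hngt ih =>
    intro hj hk
    rw [ih (by omega) hk]
    constructor
    · rintro ⟨p, q, h1, h2, h3, h4⟩; exact ⟨p, q, by omega, h2, h3, h4⟩
    · rintro ⟨p, q, h1, h2, h3, h4⟩
      refine ⟨p, q, ?_, h2, h3, h4⟩
      by_contra hp
      have hpj : p = j.toNat := by omega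
      have hq1 : q ≤ k.toNat := by omega
      have hq2 : k.toNat < L.length := by omega
      have hmq : L.getD q 0 ≤ L.getD k.toNat 0 := getD_mono L hs hq1 hq2
      rw [hpj] at h4
      have hle : L.getD j.toNat 0 + L.getD k.toNat 0 ≤ L.getD i 0 := not_lt.mp hngt
      exact hne (le_antisymm hle (by linarith))
  case case4 j k h =>
    intro hj hk
    constructor
    · intro hcontra; simp at hcontra
    · rintro ⟨p, q, h1, h2, h3, _⟩; exfalso; omega

theorem fold_squares_gen (a : List Int) :
    ∀ acc, (List.range a.length).foldl (fun acc i => acc ++ [(a.getD i 0) ^ 2]) acc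
      = acc ++ a.map (fun x => x ^ 2) := by
  induction a with
  | nil => simp
  | cons x t ih =>
    intro acc
    rw [List.length_cons, List.range_succ_eq_map, List.foldl_cons, List.foldl_map]
    simpa using ih (acc ++ [x ^ 2])

theorem fold_squares (a : List Int) :
    (List.range a.length).foldl (fun acc i => acc ++ [(a.getD i 0) ^ 2]) []
      = a.map (fun x => x ^ 2) := by
  simpa using fold_squares_gen a []

theorem exists_inner (S : List Int) (hs : S.Pairwise (· ≤ ·)) (x y : Int)
    (hx : x ∈ S) (hy : y ∈ S) (hz : x + y ∈ S) (hx0 : 0 ≤ x) (hy0 : 0 ≤ y) :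
    ∃ i : Nat, i < S.length ∧ ∃ p q : Nat, p ≤ i ∧ q ≤ i ∧
      S.getD p 0 + S.getD q 0 = S.getD i 0 := by
  obtain ⟨ix, hix, hxe⟩ := List.mem_iff_getElem.mp hx
  obtain ⟨iy, hiy, hye⟩ := List.mem_iff_getElem.mp hy
  obtain ⟨iz, hiz, hze⟩ := List.mem_iff_getElem.mp hz
  refine ⟨max ix (max iy iz), by omega, ix, iy, by omega, by omega, ?_⟩
  set i := max ix (max iy iz) with hidef
  have hilen : i < S.length := by omega
  have hup : x + y ≤ S.getD i 0 := by
    have := getD_mono S hs (show iz ≤ i by omega) hilen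
    rw [List.getD_eq_getElem _ _ hiz, hze] at this
    exact this
  have hdown : S.getD i 0 ≤ x + y := by
    have hone : i = ix ∨ i = iy ∨ i = iz := by omega
    rcases hone with h | h | h
    · rw [h, List.getD_eq_getElem _ _ hix, hxe]; omega
    · rw [h, List.getD_eq_getElem _ _ hiy, hye]; omega
    · rw [h, List.getD_eq_getElem _ _ hiz, hze]
  rw [List.getD_eq_getElem _ _ (by omega : ix < S.length), hxe,
      List.getD_eq_getElem _ _ (by omega : iy < S.length), hye]
  omega

theorem A_iff (a : List Int) :
    containsPythagoreanTriple a = true ↔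
      ∃ x ∈ a.map (fun v => v ^ 2), ∃ y ∈ a.map (fun v => v ^ 2),
        x + y ∈ a.map (fun v => v ^ 2) := by
  have hunf : containsPythagoreanTriple a
      = (List.range (PySem.List.sorted (a.map (fun v => v ^ 2)) (fun x => x) false).length).any
          (fun i => pyInner (PySem.List.sorted (a.map (fun v => v ^ 2)) (fun x => x) false)
            i 0 (i : Int)) := by
    unfold containsPythagoreanTriple
    rw [fold_squares]
  obtain ⟨S, hS⟩ : ∃ S, PySem.List.sorted (a.map (fun v => v ^ 2)) (fun x => x) false = S :=
    ⟨_, rfl⟩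
  rw [hunf, hS]
  have hs : S.Pairwise (· ≤ ·) := by
    rw [← hS]; exact PySem.List.sorted_pairwise (a.map (fun v => v ^ 2)) (fun x => x)
  have hmem : ∀ v : Int, v ∈ S ↔ v ∈ a.map (fun v => v ^ 2) := by
    intro v; rw [← hS]; exact PySem.List.mem_sorted _ _ _ _
  rw [List.any_eq_true]
  constructor
  · rintro ⟨i, hir, hinner⟩
    rw [List.mem_range] at hir
    obtain ⟨p, q, _, h2, h3, h4⟩ :=
      (pyInner_iff S hs i hir 0 (i : Int) le_rfl le_rfl).mp hinner
    have hp : p < S.length := by omega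
    have hq : q < S.length := by omega
    refine ⟨S.getD p 0, ?_, S.getD q 0, ?_, ?_⟩
    · exact (hmem _).mp (by rw [List.getD_eq_getElem _ _ hp]; exact List.getElem_mem hp)
    · exact (hmem _).mp (by rw [List.getD_eq_getElem _ _ hq]; exact List.getElem_mem hq)
    · rw [h4]
      exact (hmem _).mp (by rw [List.getD_eq_getElem _ _ hir]; exact List.getElem_mem hir)
  · rintro ⟨x, hx, y, hy, hz⟩
    have hx0 : 0 ≤ x := by
      obtain ⟨v, _, rfl⟩ := List.mem_map.mp hx; positivity
    have hy0 : 0 ≤ y := by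
      obtain ⟨v, _, rfl⟩ := List.mem_map.mp hy; positivity
    obtain ⟨i, hil, p, q, hpi, hqi, hsum⟩ :=
      exists_inner S hs x y ((hmem x).mpr hx) ((hmem y).mpr hy) ((hmem _).mpr hz) hx0 hy0
    refine ⟨i, List.mem_range.mpr hil, ?_⟩
    exact (pyInner_iff S hs i hil 0 (i : Int) le_rfl le_rfl).mpr
      ⟨p, q, by omega, hpi, by omega, hsum⟩

theorem B_iff (a : List Int) :
    containsPythagoreanTriple_alt a = true ↔
      ∃ x ∈ a.map (fun v => v ^ 2), ∃ y ∈ a.map (fun v => v ^ 2),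
        x + y ∈ a.map (fun v => v ^ 2) := by
  unfold containsPythagoreanTriple_alt
  simp only [List.any_eq_true, PySem.Set.contains_iff, PySem.Set.mem_ofList]
  constructor
  · rintro ⟨t, ht, s, hsm, hts⟩
    exact ⟨t - s, hts, s, hsm, by simpa using ht⟩
  · rintro ⟨x, hx, y, hy, hz⟩
    exact ⟨x + y, hz, y, hy, by simpa using hx⟩

-- ===== VERDICT (by name: the statement is the Claim_ definition above) =====
theorem containsPythagoreanTriple_spec : Claim_equal_containsPythagoreanTriple := by
  intro a _
  unfold Spec_containsPythagoreanTriple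
  have h := (A_iff a).trans (B_iff a).symm
  cases hA : containsPythagoreanTriple a <;> cases hB : containsPythagoreanTriple_alt a <;> simp_all
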